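-- pv_equiv track=rewrite | github.com/abaheti95/paquora | Ashutosh Features/ashu_features.py | count_punctuations
-- ===== SOURCE A (Python) =====
-- punctuations = ['.', '"',"'",'{','(','-','!','?',':']
--
-- def count_punctuations(text, num_sentences):
-- 	dots = text.count('.')
-- 	punct_count = 0
-- 	for punctuation in punctuations:
-- 		if punctuation == '.':
-- 			punct_count += num_sentences
-- 		elif punctuation == '"':
-- 			punct_count += int(text.count(punctuation)/2)
-- 		else:
-- 			punct_count += int(text.count(punctuation))
-- 	return punct_count
-- ===== SOURCE B (Python) =====
-- def count_punctuations(text, num_sentences):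
-- 	# Single streaming pass: start from num_sentences (the '.' weight) and,
-- 	# for each character, add 1 for an ordinary punctuation mark; double
-- 	# quotes are counted in pairs with a parity toggle (add 1 on every
-- 	# second '"'), which yields the floored half without any counting table.
-- 	total = num_sentences
-- 	pending_quote = False
-- 	for ch in text:
-- 		if ch in "'{(-!?:":
-- 			total += 1
-- 		elif ch == '"':
-- 			if pending_quote:
-- 				total += 1
-- 			pending_quote = not pending_quote
-- 	return total
-- ===== Notes on version B (the rewrite author's own statement) =====
-- stated objective: alternative
-- what changed: B is a single streaming pass with an accumulator and a parity toggle that counts double quotes in pairs, instead of A's nine separate text.count scans and explicit halving; no counts are ever materialised.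
import Mathlib
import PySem

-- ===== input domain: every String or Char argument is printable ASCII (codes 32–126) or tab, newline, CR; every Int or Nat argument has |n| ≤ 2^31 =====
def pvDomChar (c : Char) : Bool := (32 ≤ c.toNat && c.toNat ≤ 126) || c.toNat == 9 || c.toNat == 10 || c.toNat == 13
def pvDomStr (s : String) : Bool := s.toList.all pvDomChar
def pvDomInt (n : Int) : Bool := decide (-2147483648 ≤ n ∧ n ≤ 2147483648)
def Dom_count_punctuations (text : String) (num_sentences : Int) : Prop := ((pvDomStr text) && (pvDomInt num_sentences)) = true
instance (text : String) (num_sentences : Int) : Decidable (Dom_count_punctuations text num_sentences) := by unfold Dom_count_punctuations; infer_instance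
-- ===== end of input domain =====

-- ===== PORT A =====
-- B changes: one streaming pass with an accumulator and a parity toggle for '"' replaces A's nine text.count scans (objective: alternative).
def punctuations : List String := [".", "\"", "'", "{", "(", "-", "!", "?", ":"]

def count_punctuations (text : String) (num_sentences : Int) : Int :=
  let _dots := PySem.Str.count text "."   -- 'dots' is computed but unused in A
  let punct_count : Int := 0
  punctuations.foldl (fun acc punctuation =>
    if punctuation == "." then acc + num_sentences
    else if punctuation == "\"" then
      -- int(text.count(p)/2): the count is a nonneg int, so float-div-then-int = Nat division by 2
      acc + ((PySem.Str.count text punctuation / 2 : Nat) : Int)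
    else acc + (PySem.Str.count text punctuation : Int)) punct_count

-- ===== PORT B =====
-- 'ch in "'{(-!?:"' from Source B, as the list of its characters
def otherPuncts : List Char := ['\'', '{', '(', '-', '!', '?', ':']

def count_punctuations_alt (text : String) (num_sentences : Int) : Int :=
  let st := text.toList.foldl (fun (st : Int × Bool) ch =>
    if otherPuncts.contains ch then (st.1 + 1, st.2)
    else if ch == '"' then ((if st.2 then st.1 + 1 else st.1), !st.2)
    else st) (num_sentences, false)
  st.1

-- ===== PRECONDITION & SPEC =====
def Spec_count_punctuations (text : String) (num_sentences : Int) (out : Int) : Prop := out = count_punctuations_alt text num_sentences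
instance (text : String) (num_sentences : Int) (out : Int) : Decidable (Spec_count_punctuations text num_sentences out) := by unfold Spec_count_punctuations; infer_instance

-- ===== CLAIM (what is proved, stated in full; the proofs are below) =====
def Claim_equal_count_punctuations : Prop := ∀ (text : String) (num_sentences : Int), Dom_count_punctuations text num_sentences → Spec_count_punctuations text num_sentences (count_punctuations text num_sentences)

-- ===== LEMMAS AND PROOFS =====

-- ===== VERDICT (by name: the statement is the Claim_ definition above) =====
-- PySem.Chars.count.go on a single-character needle counts occurrences
theorem go_single (c : Char) : ∀ (l : List Char) (fuel acc : Nat), l.length ≤ fuel →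
    PySem.Chars.count.go [c] fuel l acc = acc + l.count c := by
  intro l
  induction l with
  | nil => intro fuel acc _; cases fuel <;> simp [PySem.Chars.count.go]
  | cons h t ih =>
    intro fuel acc hf
    cases fuel with
    | zero => simp at hf
    | succ f =>
      simp only [List.length_cons, Nat.succ_le_succ_iff] at hf
      by_cases hc : c = h
      · subst hc
        rw [show PySem.Chars.count.go [c] (f+1) (c :: t) acc
              = PySem.Chars.count.go [c] f t (acc + 1) by
            simp [PySem.Chars.count.go, List.isPrefixOf]]
        rw [ih f (acc + 1) hf, List.count_cons]
        simp; omega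
      · rw [show PySem.Chars.count.go [c] (f+1) (h :: t) acc
              = PySem.Chars.count.go [c] f t acc by
            simp [PySem.Chars.count.go, List.isPrefixOf, hc]]
        rw [ih f acc hf, List.count_cons]
        simp [Ne.symm hc]

theorem count_single (s : List Char) (c : Char) :
    PySem.Chars.count s [c] = s.count c := by
  simp [PySem.Chars.count, go_single c s s.length 0 le_rfl]

-- the non-'"' non-'.' punctuation characters of A, as a char count sum
def othersCnt (l : List Char) : Nat :=
  l.count '\'' + l.count '{' + l.count '(' + l.count '-' + l.count '!' +
  l.count '?' + l.count ':'

-- invariant of B's single pass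
theorem fold_inv : ∀ (l : List Char) (t : Int) (p : Bool),
    (l.foldl (fun (st : Int × Bool) ch =>
      if otherPuncts.contains ch then (st.1 + 1, st.2)
      else if ch == '"' then ((if st.2 then st.1 + 1 else st.1), !st.2)
      else st) (t, p)).1
    = t + (othersCnt l : Int)
        + (((l.count '"' + (if p then 1 else 0)) / 2 : Nat) : Int) := by
  intro l
  induction l with
  | nil => intro t p; cases p <;> simp [othersCnt]
  | cons h tl ih =>
    intro t p
    simp only [List.foldl_cons]
    by_cases hq : h = '"'
    · subst hq
      have hc : (otherPuncts.contains '"') = false := by decide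
      have hcount : (('"' :: tl).count '"') = tl.count '"' + 1 := by
        simp [List.count_cons]
      have ho : othersCnt ('"' :: tl) = othersCnt tl := by
        simp [othersCnt]
      cases p <;>
        · simp only [hc, Bool.false_eq_true, if_false, beq_self_eq_true, if_true,
            Bool.not_true, Bool.not_false]
          rw [ih, hcount, ho]
          simp only [Bool.false_eq_true, if_false, if_true]
          try push_cast
          try omega
    · have hcount : ((h :: tl).count '"') = tl.count '"' := by
        simp [List.count_cons, hq]
      by_cases hm : (otherPuncts.contains h) = true
      · rw [if_pos hm, ih]
        have hmem : h = '\'' ∨ h = '{' ∨ h = '(' ∨ h = '-' ∨ h = '!' ∨ h = '?' ∨ h = ':' := by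
          have : h ∈ otherPuncts := by simpa using hm
          simpa [otherPuncts] using this
        have ho : othersCnt (h :: tl) = othersCnt tl + 1 := by
          rcases hmem with rfl|rfl|rfl|rfl|rfl|rfl|rfl <;>
            simp [othersCnt, List.count_cons] <;> omega
        rw [hcount, ho]; push_cast; omega
      · rw [if_neg hm, if_neg (by simpa using hq), ih]
        have hnmem : ¬ (h = '\'' ∨ h = '{' ∨ h = '(' ∨ h = '-' ∨ h = '!' ∨ h = '?' ∨ h = ':') := by
          intro hcontra
          apply hm
          rcases hcontra with rfl|rfl|rfl|rfl|rfl|rfl|rfl <;> decide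
        have ho : othersCnt (h :: tl) = othersCnt tl := by
          push_neg at hnmem
          obtain ⟨h1,h2,h3,h4,h5,h6,h7⟩ := hnmem
          simp [othersCnt, List.count_cons, h1,h2,h3,h4,h5,h6,h7]
        rw [hcount, ho]

theorem count_punctuations_spec : Claim_equal_count_punctuations := by
  intro text ns _
  unfold Spec_count_punctuations count_punctuations count_punctuations_alt punctuations
  simp only [List.foldl, PySem.Str.count_eq]
  rw [fold_inv]
  simp [count_single, othersCnt]
  omega
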